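-- pv_equiv track=rewrite | github.com/pypi-data/pypi-mirror-197 | packages/rule-mining-algs/rule_mining_algs-0.1.1.tar.gz/rule_mining_algs-0.1.1/algs/fp_tree.py | generate_patterns_single_path
-- ===== SOURCE A (Python) =====
-- from typing import DefaultDict, Dict, List, Tuple
--
-- def generate_patterns_single_path(suffix: Tuple[str], path: Tuple[str], count: int) -> Dict[Tuple[str], int]:
--     """Single path optimisation for a conditional fp tree. Builds all path combinations over the prefix path
--     and appends the suffix to those. The support count is the same for all combinations as the path's count
--     has been adjusted.
--
--     Args:
--         suffix (Tuple[str]): Current frequent itemset suffix.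
--         path (Tuple[str]): Single path in the conditional tree under the suffix.
--         count (int): Support count of all path combinations.
--
--     Returns:
--         Dict[Tuple[str], int]: All path combinations concatenated to the suffix and their count.
--     """
--     frequent_itemsets = {}
--     seeds = []
--
--     for path_prefix in path:
--         for seed in range(len(seeds)):
--             frequent_itemset = seeds[seed] + (path_prefix,)
--             seeds.append(frequent_itemset)
--             frequent_itemsets[frequent_itemset + suffix] = count
--         seeds.append((path_prefix,))
--         frequent_itemsets[(path_prefix,) + suffix] = count
--
--     return frequent_itemsets
-- ===== SOURCE B (Python) =====
-- def generate_patterns_single_path(suffix, path, count):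
--     """Recursive decomposition: the non-empty order-preserving subsequences of
--     path, in A's seed order, satisfy subseqs(init + (last,)) = subseqs(init)
--     + [c + (last,) for c in subseqs(init) + [()]]; the dict is built once
--     from that complete list instead of interleaving dict writes with a
--     growing seeds accumulator scanned by index."""
--     def subseqs(p):
--         if not p:
--             return []
--         init, last = p[:-1], p[-1]
--         s = subseqs(init)
--         return s + [c + (last,) for c in s + [()]]
--     return {c + suffix: count for c in subseqs(path)}
-- ===== Notes on version B (the rewrite author's own statement) =====
-- stated objective: simpler
-- what changed: B replaces A's nested loops over a growing, index-scanned seeds accumulator with interleaved dict writes by a structural recursion on the path's last element that produces the complete subsequence list at once, from which the dict is built in a single comprehension.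
import Mathlib
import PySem

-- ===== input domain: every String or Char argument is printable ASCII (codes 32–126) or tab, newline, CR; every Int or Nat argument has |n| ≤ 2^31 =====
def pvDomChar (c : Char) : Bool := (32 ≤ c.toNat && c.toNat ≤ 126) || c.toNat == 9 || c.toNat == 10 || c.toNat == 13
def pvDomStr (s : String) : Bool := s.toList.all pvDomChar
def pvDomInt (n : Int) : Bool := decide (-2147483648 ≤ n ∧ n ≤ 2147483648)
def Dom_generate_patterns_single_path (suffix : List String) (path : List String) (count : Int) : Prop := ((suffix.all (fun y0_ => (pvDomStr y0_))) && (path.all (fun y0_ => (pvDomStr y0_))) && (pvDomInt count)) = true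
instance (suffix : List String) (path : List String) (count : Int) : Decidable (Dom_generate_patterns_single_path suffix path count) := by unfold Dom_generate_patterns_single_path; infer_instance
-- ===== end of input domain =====

-- B builds the subsequence list by recursion on the path's last element and fills the dict once, instead of A's growing index-scanned seeds accumulator with interleaved dict writes (objective: simpler).

-- ===== PORT A =====
-- literal transliteration of A: state = (frequent_itemsets dict, seeds list);
-- inner loop over range(len(seeds)) taken at loop entry, while seeds grows.
def generate_patterns_single_path (suffix : List String) (path : List String) (count : Int) : List (List String × Int) :=
  let st := path.foldl
    (fun (st : PySem.Dict (List String) Int × List (List String)) path_prefix =>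
      let st2 := (PySem.List.pyRange 0 (st.2.length : Int) 1).foldl
        (fun (st' : PySem.Dict (List String) Int × List (List String)) seed =>
          -- seeds[seed]: seed < length of seeds at loop entry ≤ current length, so always in range (no IndexError)
          let frequent_itemset := PySem.List.pyGetD st'.2 seed [] ++ [path_prefix]
          (st'.1.insert (frequent_itemset ++ suffix) count, st'.2 ++ [frequent_itemset]))
        st
      (st2.1.insert (([path_prefix]) ++ suffix) count, st2.2 ++ [[path_prefix]]))
    (PySem.Dict.empty, [])
  st.1.items

-- ===== PORT B =====
-- transliteration of Source B's helper subseqs: recursion on p[:-1], p[-1]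
def pvSubseqs (p : List String) : List (List String) :=
  if h : p = [] then []
  else
    let s := pvSubseqs p.dropLast
    s ++ (s ++ [[]]).map (· ++ [p.getLast h])
termination_by p.length
decreasing_by
  simpa [List.length_dropLast] using Nat.sub_lt (List.length_pos_of_ne_nil h) Nat.one_pos

def generate_patterns_single_path_alt (suffix : List String) (path : List String) (count : Int) : List (List String × Int) :=
  ((pvSubseqs path).foldl
    (fun (d : PySem.Dict (List String) Int) c => d.insert (c ++ suffix) count)
    PySem.Dict.empty).items

-- ===== PRECONDITION & SPEC =====
def Spec_generate_patterns_single_path (suffix : List String) (path : List String) (count : Int) (out : List (List String × Int)) : Prop := out = generate_patterns_single_path_alt suffix path count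
instance (suffix : List String) (path : List String) (count : Int) (out : List (List String × Int)) : Decidable (Spec_generate_patterns_single_path suffix path count out) := by unfold Spec_generate_patterns_single_path; infer_instance

-- ===== CLAIM (what is proved, stated in full; the proofs are below) =====
def Claim_equal_generate_patterns_single_path : Prop := ∀ (suffix : List String) (path : List String) (count : Int), Dom_generate_patterns_single_path suffix path count → Spec_generate_patterns_single_path suffix path count (generate_patterns_single_path suffix path count)

-- ===== LEMMAS AND PROOFS =====

-- snoc characterisation of B's subsequence list
theorem pvSubseqs_concat (p : List String) (x : String) :
    pvSubseqs (p ++ [x]) = pvSubseqs p ++ (pvSubseqs p ++ [[]]).map (· ++ [x]) := by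
  rw [pvSubseqs]
  simp

-- the inner loop of A, generalised over the start index and the part of seeds appended so far
theorem pv_inner (suffix : List String) (count : Int) (x : String) :
    ∀ (m k : Nat) (S Ext : List (List String)) (d : PySem.Dict (List String) Int),
      m = S.length - k → k ≤ S.length →
      (PySem.List.pyRange (k : Int) (S.length : Int) 1).foldl
        (fun (st' : PySem.Dict (List String) Int × List (List String)) seed =>
          let frequent_itemset := PySem.List.pyGetD st'.2 seed [] ++ [x]
          (st'.1.insert (frequent_itemset ++ suffix) count, st'.2 ++ [frequent_itemset]))
        (d, S ++ Ext)
      = ((S.drop k).foldl (fun d' c => d'.insert ((c ++ [x]) ++ suffix) count) d,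
         S ++ (Ext ++ (S.drop k).map (· ++ [x]))) := by
  intro m
  induction m with
  | zero =>
    intro k S Ext d hm hk
    have hkS : k = S.length := by omega
    subst hkS
    rw [PySem.List.pyRange_one_eq_nil (by omega)]
    simp
  | succ n ih =>
    intro k S Ext d hm hk
    have hlt : k < S.length := by omega
    rw [PySem.List.pyRange_one_cons (by exact_mod_cast hlt)]
    simp only [List.foldl_cons]
    have hget : PySem.List.pyGetD (S ++ Ext) (k : Int) [] = S[k] := by
      rw [PySem.List.pyGetD_natCast]
      rw [List.getD_eq_getElem?_getD, List.getElem?_append_left hlt]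
      simp [List.getElem?_eq_getElem hlt]
    have hcast : ((k : Int) + 1) = ((k + 1 : Nat) : Int) := by push_cast; ring
    rw [hget, hcast]
    have := ih (k + 1) S (Ext ++ [S[k] ++ [x]]) (d.insert ((S[k] ++ [x]) ++ suffix) count)
      (by omega) (by omega)
    simp only [List.append_assoc] at this ⊢
    rw [this]
    have hdrop : S.drop k = S[k] :: S.drop (k + 1) := List.drop_eq_getElem_cons hlt
    rw [hdrop]
    simp only [List.foldl_cons, List.map_cons, List.singleton_append]

-- the whole of A's fold computes (dict of pvSubseqs, pvSubseqs)
theorem pv_outer (suffix : List String) (count : Int) (p : List String) :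
    p.foldl
      (fun (st : PySem.Dict (List String) Int × List (List String)) path_prefix =>
        let st2 := (PySem.List.pyRange 0 (st.2.length : Int) 1).foldl
          (fun (st' : PySem.Dict (List String) Int × List (List String)) seed =>
            let frequent_itemset := PySem.List.pyGetD st'.2 seed [] ++ [path_prefix]
            (st'.1.insert (frequent_itemset ++ suffix) count, st'.2 ++ [frequent_itemset]))
          st
        (st2.1.insert (([path_prefix]) ++ suffix) count, st2.2 ++ [[path_prefix]]))
      (PySem.Dict.empty, [])
    = ((pvSubseqs p).foldl (fun d c => d.insert (c ++ suffix) count) PySem.Dict.empty,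
       pvSubseqs p) := by
  induction p using List.reverseRecOn with
  | nil => simp [pvSubseqs]
  | append_singleton p x ih =>
    rw [List.foldl_append, ih]
    simp only [List.foldl_cons, List.foldl_nil]
    have hin := pv_inner suffix count x (pvSubseqs p).length 0 (pvSubseqs p) []
      ((pvSubseqs p).foldl (fun d c => d.insert (c ++ suffix) count) PySem.Dict.empty)
      (by omega) (by omega)
    simp only [List.append_nil, List.drop_zero, Int.natCast_zero, List.nil_append] at hin
    rw [hin, pvSubseqs_concat]
    simp [List.foldl_append, List.foldl_map, List.append_assoc]

-- ===== VERDICT (by name: the statement is the Claim_ definition above) =====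
theorem generate_patterns_single_path_spec : Claim_equal_generate_patterns_single_path := by
  intro suffix path count _
  unfold Spec_generate_patterns_single_path generate_patterns_single_path generate_patterns_single_path_alt
  rw [pv_outer]
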